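-- pv_equiv track=rewrite | github.com/Suntooth/gallifreyan-tools | Spinner Gallifreyan/Efficiency/efficiency.py | digraph
-- ===== SOURCE A (Python) =====
-- def digraph(word):
--     wordList = list(word)
--     newWord = ""
--     for i in range(len(digraphs)):
--         for j in range(len(wordList)):
--             if wordList[j-1:j+1] == list(digraphs[i]):
--                 wordList[j-1] = ""
--                 wordList[j] = "x"
--
--     for i in range(len(wordList)):
--         newWord += wordList[i]
--
--     return newWord
--
-- digraphs = ["th","gh","nd","ng","ch","ck","qu","wh","sh","st"]
-- ===== SOURCE B (Python) =====
-- digraphs = ["th","gh","nd","ng","ch","ck","qu","wh","sh","st"]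
--
-- def digraph(word):
--     for d in digraphs:
--         word = word.replace(d, "x")
--     return word
-- ===== Notes on version B (the rewrite author's own statement) =====
-- stated objective: idiomatic
-- what changed: A runs, per digraph, an index loop over a mutable list of one-char cells, blanking the left cell and writing the marker into the right cell of each match, then re-joins the cells; B drops the list/marker machinery and applies str.replace per digraph directly on the string, which is exact because blank-left plus marker-right collapses to a single marker, both match left-to-right non-overlapping, and no placeholder can take part in a later digraph match.
import Mathlib
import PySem

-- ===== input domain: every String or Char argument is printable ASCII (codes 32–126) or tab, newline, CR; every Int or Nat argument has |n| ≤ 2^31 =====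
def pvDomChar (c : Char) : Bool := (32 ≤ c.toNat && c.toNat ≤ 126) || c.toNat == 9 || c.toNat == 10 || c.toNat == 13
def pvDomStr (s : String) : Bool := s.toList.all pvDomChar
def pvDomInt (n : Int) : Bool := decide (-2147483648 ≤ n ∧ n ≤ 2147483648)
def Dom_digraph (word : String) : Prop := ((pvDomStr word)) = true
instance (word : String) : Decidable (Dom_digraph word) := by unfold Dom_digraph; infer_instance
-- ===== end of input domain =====

-- B replaces A's per-digraph index scan over a mutable char list (blank left, 'x' right, then re-join)
-- by direct string substitution `word.replace(d, "x")` per digraph; objective: simpler/idiomatic.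

-- ===== PORT A =====
def digraphsA : List String := ["th","gh","nd","ng","ch","ck","qu","wh","sh","st"]

-- Python list assignment wl[i] = v; exact for -len ≤ i < len, the only indices A's loop reaches
def pySetA (l : List String) (i : Int) (v : String) : List String :=
  if i < 0 then l.set (i + l.length).toNat v else l.set i.toNat v

-- the inner `for j in range(len(wordList))` loop of A, for one digraph d
def innerPass (d : String) (wl : List String) : List String :=
  (List.range wl.length).foldl
    (fun wl2 (j : Nat) =>
      if PySem.List.slice wl2 (some ((j : Int) - 1)) (some ((j : Int) + 1))
          = d.toList.map (fun c => String.ofList [c]) then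
        pySetA (pySetA wl2 ((j : Int) - 1) "") (j : Int) "x"
      else wl2) wl

def digraph (word : String) : String :=
  let wordList := word.toList.map (fun c => String.ofList [c])
  let wordList := (List.range digraphsA.length).foldl
    (fun wl i => innerPass digraphsA[i]! wl) wordList
  (List.range wordList.length).foldl (fun s i => s ++ wordList[i]!) ""

-- ===== PORT B =====
def digraphsB : List String := ["th","gh","nd","ng","ch","ck","qu","wh","sh","st"]

def digraph_alt (word : String) : String :=
  digraphsB.foldl (fun w d => PySem.Str.replace w d "x") word

-- ===== PRECONDITION & SPEC =====
def Spec_digraph (word : String) (out : String) : Prop := out = digraph_alt word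
instance (word : String) (out : String) : Decidable (Spec_digraph word out) := by unfold Spec_digraph; infer_instance

-- ===== CLAIM (what is proved, stated in full; the proofs are below) =====
def Claim_equal_digraph : Prop := ∀ (word : String), Dom_digraph word → Spec_digraph word (digraph word)

-- ===== LEMMAS AND PROOFS =====

-- the step function of A's inner foldl (proof-side name for the loop body)
def stepP (d : String) (wl2 : List String) (j : Nat) : List String :=
  if PySem.List.slice wl2 (some ((j : Int) - 1)) (some ((j : Int) + 1))
      = d.toList.map (fun c => String.ofList [c]) then
    pySetA (pySetA wl2 ((j : Int) - 1) "") (j : Int) "x"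
  else wl2

lemma innerPass_def (d : String) (wl : List String) :
    innerPass d wl = (List.range wl.length).foldl (stepP d) wl := by
  unfold innerPass stepP
  rfl

def sing (c : Char) : String := String.ofList [c]

def repl (c1 c2 : Char) : List Char → List Char
  | [] => []
  | [a] => [a]
  | a :: b :: t =>
    if a = c1 ∧ b = c2 then 'x' :: repl c1 c2 t else a :: repl c1 c2 (b :: t)

def scanRec (c1 c2 : Char) : List String → List String
  | [] => []
  | [a] => [a]
  | a :: b :: t =>
    if a = sing c1 ∧ b = sing c2 then "" :: "x" :: scanRec c1 c2 t
    else a :: scanRec c1 c2 (b :: t)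

lemma sing_inj {c d : Char} (h : sing c = sing d) : c = d := by
  have := congrArg String.toList h
  simpa [sing] using this

lemma scanRec_x (c1 c2 : Char) (h1 : c1 ≠ 'x') (t : List String) :
    scanRec c1 c2 ("x" :: t) = "x" :: scanRec c1 c2 t := by
  have hx : "x" ≠ sing c1 := by
    intro h
    exact h1 (sing_inj (show sing 'x' = sing c1 from h)).symm
  rcases t with _ | ⟨b, t⟩
  · simp [scanRec]
  · simp [scanRec, hx]

lemma repl_x (c1 c2 : Char) (h1 : c1 ≠ 'x') (cs : List Char) :
    repl c1 c2 ('x' :: cs) = 'x' :: repl c1 c2 cs := by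
  rcases cs with _ | ⟨b, t⟩
  · simp [repl]
  · have : ¬ ('x' = c1 ∧ b = c2) := by
      rintro ⟨h, -⟩; exact h1 h.symm
    simp [repl, this]

lemma slice_pair (q : List String) (a b : String) (t : List String) :
    PySem.List.slice (q ++ a :: b :: t) (some (q.length : Int)) (some ((q.length : Int) + 2))
      = [a, b] := by
  rw [show ((q.length : Int) + 2) = ((q.length : Int) + ((2 : Nat) : Int)) from by norm_num,
    PySem.List.slice_natCast_add, List.drop_left]
  rfl

lemma set_pair (q : List String) (a b : String) (t : List String) :
    pySetA (pySetA (q ++ a :: b :: t) (q.length : Int) "") ((q.length : Int) + 1) "x"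
      = q ++ "" :: "x" :: t := by
  unfold pySetA
  rw [if_neg (by omega), if_neg (by omega)]
  rw [show ((q.length : Int)).toNat = q.length + 0 from by omega]
  rw [List.set_append_right _ _ (by omega)]
  simp only [Nat.add_sub_cancel_left, List.set_cons_zero]
  rw [show ((q.length : Int) + 1).toNat = q.length + 1 from by omega]
  rw [List.set_append_right _ _ (by omega)]
  simp

lemma aux_fold (d : String) (c1 c2 : Char) (hd : d.toList = [c1, c2]) (h1 : c1 ≠ 'x') :
    ∀ (r q : List String) (a : String),
      (List.range' (q.length + 1) r.length).foldl (stepP d) (q ++ a :: r)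
        = q ++ scanRec c1 c2 (a :: r) := by
  intro r
  induction r with
  | nil => intro q a; simp [scanRec]
  | cons b t ih =>
    intro q a
    rw [List.length_cons, List.range'_succ, List.foldl_cons]
    have hstep : stepP d (q ++ a :: b :: t) (q.length + 1)
        = if a = sing c1 ∧ b = sing c2 then q ++ "" :: "x" :: t else q ++ a :: b :: t := by
      unfold stepP
      rw [hd]
      rw [show ((q.length + 1 : Nat) : Int) - 1 = (q.length : Int) from by push_cast; ring,
        show ((q.length + 1 : Nat) : Int) + 1 = (q.length : Int) + 2 from by push_cast; ring]
      rw [slice_pair]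
      by_cases hm : a = sing c1 ∧ b = sing c2
      · rw [if_pos (by simp [hm.1, hm.2, sing]), if_pos hm]
        exact set_pair q a b t
      · rw [if_neg (by simpa [sing] using hm), if_neg hm]
    rw [hstep]
    by_cases hm : a = sing c1 ∧ b = sing c2
    · rw [if_pos hm]
      have := ih (q ++ [""]) "x"
      simp only [List.length_append, List.length_cons, List.length_nil] at this
      rw [show q.length + 0 + 1 + 1 = q.length + 1 + 1 from by omega] at this
      rw [show (q ++ [""]) ++ "x" :: t = q ++ "" :: "x" :: t from by simp] at this
      rw [this, scanRec_x c1 c2 h1]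
      simp [scanRec, hm]
    · rw [if_neg hm]
      have := ih (q ++ [a]) b
      simp only [List.length_append, List.length_cons, List.length_nil] at this
      rw [show q.length + 0 + 1 + 1 = q.length + 1 + 1 from by omega] at this
      rw [show (q ++ [a]) ++ b :: t = q ++ a :: b :: t from by simp] at this
      rw [this]
      simp [scanRec, hm]

lemma slice0_len (wl : List String) :
    (PySem.List.slice wl (some (-1)) (some 1)).length ≤ 1 := by
  rcases wl with _ | ⟨a, _ | ⟨b, t⟩⟩ <;>
    simp [PySem.List.slice, PySem.List.clampIdx]

lemma innerPass_eq (d : String) (c1 c2 : Char) (hd : d.toList = [c1, c2]) (h1 : c1 ≠ 'x')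
    (wl : List String) : innerPass d wl = scanRec c1 c2 wl := by
  rw [innerPass_def]
  rcases wl with _ | ⟨a, r⟩
  · simp [scanRec]
  · rw [List.length_cons, List.range_eq_range', List.range'_succ, List.foldl_cons]
    have hstep : stepP d (a :: r) 0 = a :: r := by
      unfold stepP
      rw [hd, if_neg]
      intro h
      have := congrArg List.length h
      have h0 := slice0_len (a :: r)
      simp only [show ((0 : Nat) : Int) - 1 = -1 from by norm_num,
        show ((0 : Nat) : Int) + 1 = 1 from by norm_num] at h
      have := congrArg List.length h
      simp at this
      omega
    rw [hstep]
    have := aux_fold d c1 c2 hd h1 r [] a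
    simpa using this

lemma replace_go_eq (c1 c2 : Char) :
    ∀ (fuel : Nat) (l acc : List Char), l.length ≤ fuel →
      PySem.Chars.replace.go [c1, c2] ['x'] fuel l acc = acc.reverse ++ repl c1 c2 l := by
  intro fuel
  induction fuel with
  | zero =>
    intro l acc h
    have : l = [] := by
      cases l
      · rfl
      · simp at h
    subst this
    simp [PySem.Chars.replace.go, repl]
  | succ fuel ih =>
    intro l acc h
    rcases l with _ | ⟨c, t⟩
    · simp [PySem.Chars.replace.go, repl]
    · rw [PySem.Chars.replace.go]
      by_cases hp : List.isPrefixOf [c1, c2] (c :: t) = true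
      · rw [if_pos hp]
        rcases t with _ | ⟨b, t'⟩
        · simp [List.isPrefixOf] at hp
        · have hc : c1 = c ∧ c2 = b := by
            simpa [List.isPrefixOf] using hp
          rw [ih _ _ (by simp at h ⊢; omega)]
          simp [repl, ← hc.1, ← hc.2]
      · rw [if_neg hp]
        rw [ih _ _ (by simp at h ⊢; omega)]
        rcases t with _ | ⟨b, t'⟩
        · simp [repl]
        · have hc : ¬ (c = c1 ∧ b = c2) := by
            intro hh
            exact hp (by simp [List.isPrefixOf, hh.1, hh.2])
          simp [repl, hc]

lemma replace_eq_repl (c1 c2 : Char) (cs : List Char) :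
    PySem.Chars.replace cs [c1, c2] ['x'] = repl c1 c2 cs := by
  rw [PySem.Chars.replace]
  simp only [List.isEmpty_cons, if_false, Bool.false_eq_true]
  rw [replace_go_eq c1 c2 cs.length cs [] le_rfl]
  simp

inductive G : List String → Prop
  | nil : G []
  | chr (c : Char) {t : List String} : G t → G (sing c :: t)
  | pair {t : List String} : G t → G ("" :: "x" :: t)

def chars (l : List String) : List Char := (l.map String.toList).flatten

lemma chars_nil : chars [] = [] := rfl

lemma chars_cons (a : String) (t : List String) : chars (a :: t) = a.toList ++ chars t := rfl

lemma toList_sing (c : Char) : (sing c).toList = [c] := by simp [sing]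

lemma G_inv {l : List String} (h : G l) :
    l = [] ∨ (∃ c t, l = sing c :: t ∧ G t) ∨ (∃ t, l = "" :: "x" :: t ∧ G t) := by
  cases h with
  | nil => exact Or.inl rfl
  | chr c hG => exact Or.inr (Or.inl ⟨c, _, rfl, hG⟩)
  | pair hG => exact Or.inr (Or.inr ⟨_, rfl, hG⟩)

lemma sing_ne_empty (c : Char) : sing c ≠ "" := by
  intro h
  have := congrArg String.toList h
  simp [sing] at this

lemma G_inv_cons {a : String} {l : List String} (h : G (a :: l)) :
    (∃ c, a = sing c ∧ G l) ∨ (a = "" ∧ ∃ t, l = "x" :: t ∧ G t) := by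
  rcases G_inv h with h0 | ⟨c, t, he, hG⟩ | ⟨t, he, hG⟩
  · exact absurd h0 (by simp)
  · rw [List.cons.injEq] at he
    exact Or.inl ⟨c, he.1, he.2 ▸ hG⟩
  · rw [List.cons.injEq] at he
    exact Or.inr ⟨he.1, t, he.2, hG⟩

lemma scan_main (c1 c2 : Char) (h1 : c1 ≠ 'x') (h2 : c2 ≠ 'x') :
    ∀ (L : List String), G L →
      G (scanRec c1 c2 L) ∧ chars (scanRec c1 c2 L) = repl c1 c2 (chars L) := by
  intro L
  induction L using scanRec.induct c1 c2 with
  | case1 => intro _; exact ⟨G.nil, by simp [scanRec, chars_nil, repl]⟩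
  | case2 a =>
    intro hG
    rcases G_inv_cons hG with ⟨c, ha, -⟩ | ⟨ha, t, he, -⟩
    · subst ha
      exact ⟨G.chr c G.nil, by simp [scanRec, chars_cons, chars_nil, toList_sing, repl]⟩
    · simp at he
  | case3 a b t hm ih =>
    intro hG
    obtain ⟨ha, hb⟩ := hm
    subst ha hb
    have hGt : G t := by
      rcases G_inv_cons hG with ⟨c, -, hG'⟩ | ⟨ha, -⟩
      · rcases G_inv_cons hG' with ⟨c', -, hG''⟩ | ⟨hb, -⟩
        · exact hG''
        · exact absurd hb (sing_ne_empty c2)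
      · exact absurd ha (sing_ne_empty c1)
    obtain ⟨ihG, ihc⟩ := ih hGt
    rw [show scanRec c1 c2 (sing c1 :: sing c2 :: t) = "" :: "x" :: scanRec c1 c2 t from by
      simp [scanRec]]
    refine ⟨G.pair ihG, ?_⟩
    rw [chars_cons, chars_cons, chars_cons, chars_cons, toList_sing, toList_sing, ihc]
    simp [repl]
  | case4 a b t hm ih =>
    intro hG
    rw [show scanRec c1 c2 (a :: b :: t) = a :: scanRec c1 c2 (b :: t) from by
      simp [scanRec, hm]]
    rcases G_inv_cons hG with ⟨c, ha, hG'⟩ | ⟨ha, t0, he, hG0⟩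
    · subst ha
      obtain ⟨ihG, ihc⟩ := ih hG'
      refine ⟨G.chr c ihG, ?_⟩
      rw [chars_cons, chars_cons, toList_sing, ihc]
      rcases G_inv_cons hG' with ⟨c', hb, -⟩ | ⟨hb, t1, he1, -⟩
      · subst hb
        have hcc : ¬ (c = c1 ∧ c' = c2) := by
          intro hh
          exact hm ⟨by rw [hh.1], by rw [hh.2]⟩
        rw [chars_cons, toList_sing]
        simp [repl, hcc]
      · subst hb he1
        rw [chars_cons, chars_cons]
        have hxne : ¬ (c = c1 ∧ 'x' = c2) := by
          rintro ⟨-, hx⟩; exact h2 hx.symm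
        simp only [show ("" : String).toList = [] from rfl,
          show ("x" : String).toList = ['x'] from rfl, List.nil_append, List.cons_append]
        simp [repl, hxne]
    · rw [List.cons.injEq] at he
      obtain ⟨hb, ht⟩ := he
      subst ha hb ht
      have hGxt : G ("x" :: t) := G.chr 'x' hG0
      obtain ⟨ihG, ihc⟩ := ih hGxt
      rw [scanRec_x c1 c2 h1] at ihG ihc
      have hGs : G (scanRec c1 c2 t) := by
        rcases G_inv_cons ihG with ⟨c, -, hh⟩ | ⟨hx, -⟩
        · exact hh
        · exact absurd hx (by decide)
      rw [scanRec_x c1 c2 h1]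
      refine ⟨G.pair hGs, ?_⟩
      rw [chars_cons, chars_cons] at ihc ⊢
      rw [chars_cons, chars_cons]
      simp only [show ("" : String).toList = [] from rfl,
        show ("x" : String).toList = ['x'] from rfl, List.nil_append, List.cons_append] at ihc ⊢
      rw [repl_x c1 c2 h1] at ihc ⊢
      rw [List.cons.injEq] at ihc
      rw [ihc.2]

lemma stage (d : String) (c1 c2 : Char) (hd : d.toList = [c1, c2])
    (h1 : c1 ≠ 'x') (h2 : c2 ≠ 'x') (L : List String) (hG : G L) :
    G (innerPass d L) ∧
      chars (innerPass d L) = PySem.Chars.replace (chars L) d.toList ['x'] := by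
  rw [innerPass_eq d c1 c2 hd h1, hd, replace_eq_repl]
  exact scan_main c1 c2 h1 h2 L hG

lemma stages (ds : List String)
    (h : ∀ d ∈ ds, ∃ c1 c2, d.toList = [c1, c2] ∧ c1 ≠ 'x' ∧ c2 ≠ 'x') :
    ∀ (L : List String), G L →
      G (ds.foldl (fun wl d => innerPass d wl) L) ∧
        chars (ds.foldl (fun wl d => innerPass d wl) L)
          = ds.foldl (fun cs d => PySem.Chars.replace cs d.toList ['x']) (chars L) := by
  induction ds with
  | nil => intro L hG; exact ⟨hG, rfl⟩
  | cons d ds ih =>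
    intro L hG
    obtain ⟨c1, c2, hd, h1, h2⟩ := h d (by simp)
    obtain ⟨hG', hc⟩ := stage d c1 c2 hd h1 h2 L hG
    have := ih (fun d hd => h d (by simp [hd])) (innerPass d L) hG'
    rw [List.foldl_cons, List.foldl_cons, ← hc]
    exact this

lemma range_foldl_getElem {α β : Type} [Inhabited α] (l : List α) (f : β → α → β) (s0 : β) :
    (List.range l.length).foldl (fun s i => f s l[i]!) s0 = l.foldl f s0 := by
  induction l using List.reverseRecOn generalizing s0 with
  | nil => rfl
  | append_singleton l a ih =>
    rw [List.length_append, List.length_cons, List.length_nil, List.range_succ,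
      List.foldl_append, List.foldl_append]
    simp only [List.foldl_cons, List.foldl_nil]
    rw [show (l ++ [a])[l.length]! = a from by
      rw [getElem!_pos (l ++ [a]) l.length (by simp)]; simp]
    congr 1
    rw [← ih]
    apply List.foldl_ext
    intro b i hi
    simp only [List.mem_range] at hi
    congr 1
    rw [getElem!_pos (l ++ [a]) i (by simp; omega), getElem!_pos l i hi]
    exact List.getElem_append_left _

lemma join_toList (wl : List String) : ∀ (s0 : String),
    (wl.foldl (fun s e => s ++ e) s0).toList = s0.toList ++ chars wl := by
  induction wl with
  | nil => intro s0; simp [chars_nil]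
  | cons a t ih =>
    intro s0
    rw [List.foldl_cons, ih, chars_cons]
    simp

lemma chars_map_sing (cs : List Char) : chars (cs.map sing) = cs := by
  induction cs with
  | nil => rfl
  | cons c t ih => rw [List.map_cons, chars_cons, toList_sing, ih]; rfl

lemma G_map_sing (cs : List Char) : G (cs.map sing) := by
  induction cs with
  | nil => exact G.nil
  | cons c t ih => exact G.chr c ih

lemma alt_toList (ds : List String) : ∀ (w : String),
    (ds.foldl (fun w d => PySem.Str.replace w d "x") w).toList
      = ds.foldl (fun cs d => PySem.Chars.replace cs d.toList ['x']) w.toList := by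
  induction ds with
  | nil => intro w; rfl
  | cons d ds ih =>
    intro w
    rw [List.foldl_cons, List.foldl_cons, ih, PySem.Str.toList_replace]
    rfl

lemma digraphs_ok : ∀ d ∈ digraphsA, ∃ c1 c2, d.toList = [c1, c2] ∧ c1 ≠ 'x' ∧ c2 ≠ 'x' := by
  intro d hd
  fin_cases hd
  · exact ⟨'t','h', by decide, by decide, by decide⟩
  · exact ⟨'g','h', by decide, by decide, by decide⟩
  · exact ⟨'n','d', by decide, by decide, by decide⟩
  · exact ⟨'n','g', by decide, by decide, by decide⟩
  · exact ⟨'c','h', by decide, by decide, by decide⟩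
  · exact ⟨'c','k', by decide, by decide, by decide⟩
  · exact ⟨'q','u', by decide, by decide, by decide⟩
  · exact ⟨'w','h', by decide, by decide, by decide⟩
  · exact ⟨'s','h', by decide, by decide, by decide⟩
  · exact ⟨'s','t', by decide, by decide, by decide⟩
-- ===== VERDICT (by name: the statement is the Claim_ definition above) =====
theorem digraph_spec : Claim_equal_digraph := by
  intro word _
  unfold Spec_digraph
  apply String.toList_inj.mp
  unfold digraph digraph_alt
  simp only []
  rw [range_foldl_getElem digraphsA (fun wl d => innerPass d wl)]
  rw [range_foldl_getElem _ (fun s e => s ++ e)]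
  rw [join_toList]
  obtain ⟨-, hc⟩ := stages digraphsA digraphs_ok
    (word.toList.map (fun c => String.ofList [c]))
    (G_map_sing word.toList)
  rw [show (word.toList.map (fun c => String.ofList [c])) = word.toList.map sing from rfl] at hc ⊢
  rw [hc, chars_map_sing, alt_toList]
  rw [show digraphsB = digraphsA from rfl]
  simp
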